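-- pv_equiv track=rewrite | github.com/s2018952/Advent-of-Code | 2024/25-12-2024/solution1.py | getKeySpaceList
-- ===== SOURCE A (Python) =====
-- def getKeySpaceList(key):
--     output = []
--     for j in range(len(key[0])):
--         for i in range(len(key) - 1,-1,-1):
--             if key[i][j] == '.':
--                 output.append(len(key) - i - 2)
--                 break
--     return output
-- ===== SOURCE B (Python) =====
-- def getKeySpaceList(key):
--     ncols = len(key[0])
--     last = [None] * ncols
--     for i, row in enumerate(key):
--         for j in range(ncols):
--             if row[j] == '.':
--                 last[j] = i
--     return [len(key) - r - 2 for r in last if r is not None]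
-- ===== Notes on version B (the rewrite author's own statement) =====
-- stated objective: alternative
-- what changed: Replaces A's per-column bottom-up scan with break by a single row-major pass maintaining a per-column 'last dot row' array, then one mapping pass over that array.
-- outside the precondition, e.g. on getKeySpaceList(['..', '.', '..']): A returns [-1, -1], B raises IndexError
import Mathlib
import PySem

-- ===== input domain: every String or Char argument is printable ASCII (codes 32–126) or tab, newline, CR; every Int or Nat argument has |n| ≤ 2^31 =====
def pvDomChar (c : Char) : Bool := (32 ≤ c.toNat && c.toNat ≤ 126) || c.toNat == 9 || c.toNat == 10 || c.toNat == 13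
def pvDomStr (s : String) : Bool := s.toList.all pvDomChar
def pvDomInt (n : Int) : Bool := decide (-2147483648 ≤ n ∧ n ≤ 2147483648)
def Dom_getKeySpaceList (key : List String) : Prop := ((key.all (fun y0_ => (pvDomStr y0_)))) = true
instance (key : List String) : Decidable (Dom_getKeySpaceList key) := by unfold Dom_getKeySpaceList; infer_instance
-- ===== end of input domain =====

-- B replaces A's per-column bottom-up scan-with-break by a single row-major pass keeping a
-- per-column "last row with '.'" array, followed by one mapping pass over that array (objective: alternative).

-- len(key[0]) (Python raises IndexError on empty key; excluded by Pre_)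
def pvNcols (key : List String) : Int := PySem.Str.len ((PySem.List.pyGet? key 0).getD "")

-- ===== PORT A =====
-- key[i][j] (none exactly where Python raises; Pre_ keeps every access in range)
def pvCharAt (key : List String) (i j : Int) : Option Char :=
  (PySem.List.pyGet? key i).bind (fun s => PySem.Str.pyGet? s j)

-- inner 'for i in range(len(key)-1,-1,-1): if key[i][j]=='.': output.append(...); break'
def pvGoA (key : List String) (j : Int) (is : List Int) (output : List Int) : List Int :=
  match is with
  | [] => output
  | i :: rest =>
    if pvCharAt key i j = some '.' then output ++ [(key.length : Int) - i - 2]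
    else pvGoA key j rest output

def getKeySpaceList (key : List String) : List Int :=
  (PySem.List.pyRange 0 (pvNcols key)).foldl
    (fun output j => pvGoA key j (PySem.List.pyRange ((key.length : Int) - 1) (-1) (-1)) output) []

-- ===== PORT B =====
-- inner 'for j in range(ncols): if row[j]=='.': last[j] = i'
def pvRowPass (row : String) (i : Int) (ncols : Int) (last : List (Option Int)) : List (Option Int) :=
  (PySem.List.pyRange 0 ncols).foldl
    (fun last j => if PySem.Str.pyGet? row j = some '.' then last.set j.toNat (some i) else last) last

def getKeySpaceList_alt (key : List String) : List Int :=
  let ncols := pvNcols key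
  let last := (PySem.List.enumerate key).foldl (fun last p => pvRowPass p.2 p.1 ncols last)
      (List.replicate ncols.toNat (none : Option Int))
  last.filterMap (fun r => r.map (fun i => (key.length : Int) - i - 2))

-- ===== PRECONDITION & SPEC =====
-- Pre_ excludes exactly the inputs on which Python indexing raises IndexError: the empty list
-- (key[0]) and ragged grids where some row is shorter than row 0 — both programs index row[j]
-- for j < len(key[0]); A can return on such a ragged grid only when every column's bottom-up
-- break happens below the short row, an accident of the break that B's full pass does not share.
def Pre_getKeySpaceList (key : List String) : Prop :=
  key ≠ [] ∧ ∀ s ∈ key, key.headI.toList.length ≤ s.toList.length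
instance (key : List String) : Decidable (Pre_getKeySpaceList key) := by
  unfold Pre_getKeySpaceList; infer_instance
def pvWitness_getKeySpaceList : List String := ["#.", ".#"]

def Spec_getKeySpaceList (key : List String) (out : List Int) : Prop := out = getKeySpaceList_alt key
instance (key : List String) (out : List Int) : Decidable (Spec_getKeySpaceList key out) := by unfold Spec_getKeySpaceList; infer_instance

-- ===== CLAIM (what is proved, stated in full; the proofs are below) =====
def Claim_equal_getKeySpaceList : Prop := ∀ (key : List String), Dom_getKeySpaceList key → Pre_getKeySpaceList key → Spec_getKeySpaceList key (getKeySpaceList key)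

-- ===== LEMMAS AND PROOFS =====

-- Bool predicate: the character at row `k`, column `j` is '.'
def pvDot (key : List String) (j k : Nat) : Bool :=
  decide (pvCharAt key (k : Int) (j : Int) = some '.')

-- the answer for one column, as both programs compute it: bottommost '.' row, mapped
def pvCol (key : List String) (j : Nat) : Option Int :=
  (((List.range key.length).reverse.find? (pvDot key j)).map
    (fun k => (key.length : Int) - (k : Int) - 2))

lemma pvGoA_eq (key : List String) (j : Int) (is : List Int) (output : List Int) :
    pvGoA key j is output =
      output ++ ((is.find? (fun i => decide (pvCharAt key i j = some '.'))).map
        (fun i => (key.length : Int) - i - 2)).toList := by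
  induction is with
  | nil => simp [pvGoA]
  | cons i rest ih =>
    by_cases h : pvCharAt key i j = some '.'
    · simp [pvGoA, h, List.find?]
    · simp [pvGoA, h, List.find?, ih]

lemma find?_congr_mem {α : Type} {p q : α → Bool} :
    ∀ (l : List α), (∀ x ∈ l, p x = q x) → l.find? p = l.find? q := by
  intro l
  induction l with
  | nil => intro _; rfl
  | cons x xs ih =>
    intro h
    have hx := h x (by simp)
    simp only [List.find?, hx]
    cases q x
    · exact ih (fun y hy => h y (by simp [hy]))
    · rfl

-- A as a flatMap of per-column answers
lemma A_eq (key : List String) :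
    getKeySpaceList key = (List.range (pvNcols key).toNat).flatMap (fun j => (pvCol key j).toList) := by
  have hC : pvNcols key = ((pvNcols key).toNat : Int) := by
    simp [pvNcols, PySem.Str.len_eq]
  unfold getKeySpaceList
  rw [hC, PySem.List.pyRange_zero_nat]
  simp only [pvGoA_eq]
  rw [PySem.List.foldl_append_eq_flatMap, List.nil_append, List.flatMap_map]
  apply List.flatMap_congr
  intro j _
  -- rewrite the descending range as the reverse of the ascending one
  have hr : PySem.List.pyRange ((key.length : Int) - 1) (-1) (-1)
      = (PySem.List.pyRange 0 (key.length : Int)).reverse := by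
    rw [PySem.List.pyRange_neg_one_eq_reverse]
    norm_num
  rw [hr, PySem.List.pyRange_zero_nat, ← List.map_reverse, List.find?_map]
  unfold pvCol
  rw [find?_congr_mem ((List.range key.length).reverse)
        (p := (fun i => decide (pvCharAt key i (j:Int) = some '.')) ∘ (fun k : Nat => (k:Int)))
        (q := pvDot key j) (fun x _ => rfl)]
  cases (List.range key.length).reverse.find? (pvDot key j) <;> rfl

-- one program-specific Bool: row has '.' at column j
def pvHasDot (row : String) (j : Nat) : Bool :=
  decide (PySem.Str.pyGet? row (j : Int) = some '.')

-- setting along List.range only rewrites the first m entries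
lemma setFold (row : String) (i : Int) :
    ∀ (m : Nat) (L : List (Option Int)), m ≤ L.length →
    (List.range m).foldl
        (fun last j => if pvHasDot row j then last.set j (some i) else last) L
      = (List.range m).map (fun j => if pvHasDot row j then some i else L.getD j none)
        ++ L.drop m := by
  intro m
  induction m with
  | zero => intro L _; simp
  | succ m ih =>
    intro L hm
    have hmL : m < L.length := by omega
    rw [List.range_succ, List.foldl_append, ih L (by omega), List.map_append,
        List.foldl_cons, List.foldl_nil, List.append_assoc]
    have hdrop : L.drop m = L[m] :: L.drop (m + 1) := List.drop_eq_getElem_cons hmL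
    by_cases h : pvHasDot row m
    · rw [if_pos h, List.set_append]
      simp only [List.length_map, List.length_range]
      rw [if_neg (by omega), Nat.sub_self, hdrop, List.set_cons_zero]
      simp [h]
    · rw [if_neg h, hdrop]
      simp [h, List.getElem?_eq_getElem hmL]

lemma rowPass_eq (row : String) (i : Int) (c : Nat) (L : List (Option Int)) (hL : L.length = c) :
    pvRowPass row i (c : Int) L
      = (List.range c).map (fun j => if pvHasDot row j then some i else L.getD j none) := by
  unfold pvRowPass
  rw [PySem.List.pyRange_zero_nat, List.foldl_map]
  have : (fun (last : List (Option Int)) (j : Nat) =>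
      if PySem.Str.pyGet? row (j:Int) = some '.' then last.set (j:Int).toNat (some i) else last)
      = fun last j => if pvHasDot row j then last.set j (some i) else last := by
    funext last j
    simp [pvHasDot]
  rw [this, setFold row i c L (by omega)]
  simp [hL]

-- the nested fold is pointwise per column
lemma outer_eq (c : Nat) :
    ∀ (ps : List (Int × String)) (L : List (Option Int)), L.length = c →
    ps.foldl (fun last p => pvRowPass p.2 p.1 (c : Int) last) L
      = (List.range c).map (fun j =>
          ps.foldl (fun acc p => if pvHasDot p.2 j then some p.1 else acc) (L.getD j none)) := by
  intro ps
  induction ps with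
  | nil =>
    intro L hL
    subst hL
    simp only [List.foldl_nil]
    refine List.ext_getElem (by simp) ?_
    intro k h1 h2
    simp [List.getElem?_eq_getElem h1]
  | cons p ps ih =>
    intro L hL
    rw [List.foldl_cons, rowPass_eq p.2 p.1 c L hL,
        ih _ (by simp)]
    apply List.map_congr_left
    intro j hj
    rw [PySem.List.getD_map_range _ _ _ _ (by simpa using hj), List.foldl_cons]

-- last-write-wins fold is find? on the reversed list
lemma lastWrite {α : Type} (q : α → Bool) (f : α → Int) :
    ∀ (ps : List α) (acc : Option Int),
    ps.foldl (fun acc x => if q x then some (f x) else acc) acc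
      = ((ps.reverse.find? q).map f).or acc := by
  intro ps
  induction ps with
  | nil => intro acc; rfl
  | cons x ps ih =>
    intro acc
    rw [List.foldl_cons, ih, List.reverse_cons, List.find?_append]
    cases hf : ps.reverse.find? q
    · simp only [Option.or, Option.map]
      by_cases h : q x <;> simp [List.find?, h]
    · simp [Option.or]

lemma enum_eq (xs : List String) :
    ∀ (a : Int), PySem.List.enumerate xs a
      = (List.range xs.length).map (fun k : Nat => (a + (k : Int), xs.getD k "")) := by
  induction xs with
  | nil => intro a; simp [PySem.List.enumerate]
  | cons x xs ih =>
    intro a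
    rw [PySem.List.enumerate_cons, ih (a + 1)]
    simp only [List.length_cons, List.range_succ_eq_map, List.map_cons, List.map_map]
    refine congrArg₂ _ (by simp) ?_
    apply List.map_congr_left
    intro k _
    simp [Nat.succ_eq_add_one]
    ring_nf

-- B as a flatMap of the same per-column answers
lemma B_eq (key : List String) :
    getKeySpaceList_alt key = (List.range (pvNcols key).toNat).flatMap (fun j => (pvCol key j).toList) := by
  have hC : pvNcols key = ((pvNcols key).toNat : Int) := by
    simp [pvNcols, PySem.Str.len_eq]
  unfold getKeySpaceList_alt
  simp only
  rw [hC]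
  simp only [Int.toNat_natCast]
  rw [enum_eq key 0,
      outer_eq (pvNcols key).toNat _ _ (by simp)]
  rw [List.filterMap_map, List.filterMap_eq_flatMap_toList]
  apply List.flatMap_congr
  intro j hj
  have hjc : j < (pvNcols key).toNat := by simpa using hj
  -- reduce the inner fold over the rows
  simp only [Function.comp_apply]
  rw [List.foldl_map,
      show (fun (acc : Option Int) (k : Nat) =>
          if pvHasDot ((fun k : Nat => ((0:Int) + (k:Int), key.getD k "")) k).2 j then
            some ((fun k : Nat => ((0:Int) + (k:Int), key.getD k "")) k).1 else acc)
        = fun acc k => if (fun k => pvHasDot (key.getD k "") j) k then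
            some ((fun k : Nat => (0:Int) + (k:Int)) k) else acc from rfl,
      lastWrite (fun k => pvHasDot (key.getD k "") j) (fun k : Nat => (0:Int) + (k:Int))]
  rw [List.getD_replicate _ hjc]
  rw [find?_congr_mem ((List.range key.length).reverse)
        (p := fun k => pvHasDot (key.getD k "") j) (q := pvDot key j) ?_]
  · unfold pvCol
    cases (List.range key.length).reverse.find? (pvDot key j) <;> simp [Option.or]
  · intro k hk
    have hkn : k < key.length := by simpa using hk
    simp [pvHasDot, pvDot, pvCharAt, PySem.List.pyGet?_natCast, hkn]

-- ===== VERDICT (by name: the statement is the Claim_ definition above) =====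
theorem getKeySpaceList_spec : Claim_equal_getKeySpaceList := by
  intro key _ _
  unfold Spec_getKeySpaceList
  rw [A_eq, B_eq]
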